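-- pv_equiv track=rewrite | github.com/nlevhari/aldous_spectral_gaps | wreath_product.py | group_multiply
-- ===== SOURCE A (Python) =====
-- def compose_permutations(sigma, tau):
--     """
--     Return sigma o tau as a tuple,
--     meaning first apply tau, then apply sigma.
--     Both sigma and tau are stored as 0-based tuples:
--       sigma[i] = sigma(i).
--     """
--     n = len(sigma)
--     # (sigma o tau)(i) = sigma(tau(i))
--     return tuple(sigma[tau[i]] for i in range(n))
--
-- def invert_permutation(sigma):
--     """
--     Given sigma as a tuple, return its inverse as a tuple.
--     That is inv_sigma[sigma[i]] = i.
--     """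
--     n = len(sigma)
--     inv = [None]*n
--     for i in range(n):
--         inv[sigma[i]] = i
--     return tuple(inv)
--
-- def group_multiply(g1, g2, n, m):
--     """
--     Multiply two wreath product elements g1, g2 in C_m^n rtimes S_n.
--     g1 = (sigma1, (a1,...,an))
--     g2 = (sigma2, (b1,...,bn))
--     We use the formula:
--       (sigma1, a) * (sigma2, b) = (sigma1 o sigma2, (a1 + b_{sigma1^-1(1)}, ..., an + b_{sigma1^-1(n)})) mod m
--     """
--     sigma1, a = g1
--     sigma2, b = g2
--     inv_sigma1 = invert_permutation(sigma1)
--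
--     # compose permutations
--     sigma12 = compose_permutations(sigma1, sigma2)
--
--     # add bottom components using the appropriate index shift
--     new_a = [None]*n
--     for i in range(n):
--         # find j = sigma1^-1(i)
--         j = inv_sigma1[i]
--         new_a[i] = (a[i] + b[j]) % m
--
--     return (sigma12, tuple(new_a))
-- ===== SOURCE B (Python) =====
-- def group_multiply(g1, g2, n, m):
--     """
--     Multiply two wreath product elements.  Instead of building the inverse
--     permutation, pair each bottom entry b[j] with its destination sigma1[j]
--     and SORT the pairs by destination: since sigma1 is a permutation of
--     range(n), the k-th sorted pair is (k, b[sigma1^{-1}(k)]).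
--     """
--     sigma1, a = g1
--     sigma2, b = g2
--     sigma12 = tuple(sigma1[sigma2[i]] for i in range(len(sigma1)))
--     pairs = sorted(zip(sigma1, b), key=lambda p: p[0])
--     new_a = tuple((a[i] + pairs[i][1]) % m for i in range(n))
--     return (sigma12, new_a)
-- ===== Notes on version B (the rewrite author's own statement) =====
-- stated objective: alternative
-- what changed: B drops invert_permutation entirely: it pairs each bottom entry b[j] with its destination sigma1[j] via zip, sorts the pairs by destination (so the k-th sorted pair is (k, b[sigma1^-1(k)]) because sigma1 is a permutation of range(n)), and reads the bottom values off the sorted table instead of gathering through an inverse-permutation array; it trades A's O(n) inverse table for an O(n log n) sort. …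
-- outside the precondition, e.g. on group_multiply(((1, 0), (0, 0)), ((0, 0), (0, 0)), 1, 2): A returns ((1, 1), (0,)), B returns ((1, 1), (0,))
import Mathlib
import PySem

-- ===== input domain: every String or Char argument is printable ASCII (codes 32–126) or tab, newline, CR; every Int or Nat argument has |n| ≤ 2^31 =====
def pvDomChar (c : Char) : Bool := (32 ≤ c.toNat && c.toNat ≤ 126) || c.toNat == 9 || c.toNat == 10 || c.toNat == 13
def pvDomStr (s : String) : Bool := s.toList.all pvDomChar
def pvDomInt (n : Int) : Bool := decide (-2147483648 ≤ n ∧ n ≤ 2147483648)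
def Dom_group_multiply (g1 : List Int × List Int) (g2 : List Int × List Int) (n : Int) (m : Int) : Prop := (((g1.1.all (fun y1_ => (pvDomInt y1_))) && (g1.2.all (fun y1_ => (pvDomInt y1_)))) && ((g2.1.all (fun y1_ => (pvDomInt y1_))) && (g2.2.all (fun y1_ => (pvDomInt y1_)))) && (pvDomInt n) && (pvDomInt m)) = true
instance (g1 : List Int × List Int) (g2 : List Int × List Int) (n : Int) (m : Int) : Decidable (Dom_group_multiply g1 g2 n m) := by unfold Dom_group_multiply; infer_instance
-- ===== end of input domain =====

-- B replaces A's invert-then-gather of the bottom components by a sort: it pairs each b[j]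
-- with its destination sigma1[j] and sorts the pairs by destination, so no inverse
-- permutation table is ever built; objective: alternative (same O cost up to the sort).

-- Python list item assignment `xs[i] = v` (negative i from the end; out of range = IndexError,
-- excluded by Pre_, here a no-op totality guard). Used by A's invert_permutation.
def pvSetItem {α : Type} (xs : List α) (i : Int) (v : α) : List α :=
  let idx : Int := if i < 0 then i + xs.length else i
  if 0 ≤ idx ∧ idx < xs.length then xs.set idx.toNat v else xs

-- ===== PORT A =====
def compose_permutations (sigma : List Int) (tau : List Int) : List Int :=
  (PySem.List.pyRange 0 (sigma.length : Int)).map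
    (fun i => PySem.List.pyGetD sigma (PySem.List.pyGetD tau i 0) 0)

def invert_permutation (sigma : List Int) : List (Option Int) :=
  (PySem.List.pyRange 0 (sigma.length : Int)).foldl
    (fun inv i => pvSetItem inv (PySem.List.pyGetD sigma i 0) (some i))
    (List.replicate sigma.length none)

def group_multiply (g1 : List Int × List Int) (g2 : List Int × List Int) (n : Int) (m : Int) : List Int × List Int :=
  let sigma1 := g1.1
  let a := g1.2
  let sigma2 := g2.1
  let b := g2.2
  let inv_sigma1 := invert_permutation sigma1
  let sigma12 := compose_permutations sigma1 sigma2
  let new_a := (PySem.List.pyRange 0 n).map (fun i =>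
    match PySem.List.pyGetD inv_sigma1 i none with   -- j = inv_sigma1[i]; b[None] would raise: guard
    | some j => PySem.Int.mod (PySem.List.pyGetD a i 0 + PySem.List.pyGetD b j 0) m
    | none => 0)
  (sigma12, new_a)

-- ===== PORT B =====
def group_multiply_alt (g1 : List Int × List Int) (g2 : List Int × List Int) (n : Int) (m : Int) : List Int × List Int :=
  let sigma1 := g1.1
  let a := g1.2
  let sigma2 := g2.1
  let b := g2.2
  let sigma12 := (PySem.List.pyRange 0 (sigma1.length : Int)).map
    (fun i => PySem.List.pyGetD sigma1 (PySem.List.pyGetD sigma2 i 0) 0)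
  let pairs := PySem.List.sorted (List.zip sigma1 b) (fun p => p.1) false
  let new_a := (PySem.List.pyRange 0 n).map (fun i =>
    PySem.Int.mod (PySem.List.pyGetD a i 0 + (PySem.List.pyGetD pairs i ((0 : Int), (0 : Int))).2) m)
  (sigma12, new_a)

-- ===== PRECONDITION & SPEC =====
-- Pre_ admits the natural wreath-product domain — sigma1 a permutation of 0..n-1 of length n,
-- the used prefixes of sigma2, a, b present (length ≥ n, sigma2's used entries valid indices),
-- m ≠ 0 — plus the degenerate inputs with n ≤ 0 on which the bottom loops never run and A
-- returns (sigma1 ∘ sigma2, ()).  Outside it A raises (IndexError / TypeError on b[None] /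
-- ZeroDivisionError) except where Python's negative-index wraparound or a 0 < n < len(sigma1)
-- mismatch lets A return a value that is an artefact of its len(sigma1)-driven loops.
def Pre_group_multiply (g1 : List Int × List Int) (g2 : List Int × List Int) (n : Int) (m : Int) : Prop :=
  (n ≤ 0 ∧ (∀ x ∈ g1.1, -(g1.1.length : Int) ≤ x ∧ x < (g1.1.length : Int)) ∧
   g1.1.length ≤ g2.1.length ∧
   (∀ x ∈ g2.1.take g1.1.length, -(g1.1.length : Int) ≤ x ∧ x < (g1.1.length : Int))) ∨
  (0 ≤ n ∧ g1.1.length = n.toNat ∧ n.toNat ≤ g1.2.length ∧ n.toNat ≤ g2.1.length ∧ n.toNat ≤ g2.2.length ∧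
   g1.1.Nodup ∧ (∀ x ∈ g1.1, 0 ≤ x ∧ x < n) ∧ (∀ x ∈ g2.1.take n.toNat, -n ≤ x ∧ x < n) ∧ m ≠ 0)

instance (g1 : List Int × List Int) (g2 : List Int × List Int) (n : Int) (m : Int) : Decidable (Pre_group_multiply g1 g2 n m) := by
  unfold Pre_group_multiply; infer_instance

def pvWitness_group_multiply : (List Int × List Int) × (List Int × List Int) × Int × Int :=
  (([1, 0], [2, 3]), ([0, 1], [1, 4]), 2, 5)

def Spec_group_multiply (g1 : List Int × List Int) (g2 : List Int × List Int) (n : Int) (m : Int) (out : List Int × List Int) : Prop := out = group_multiply_alt g1 g2 n m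
instance (g1 : List Int × List Int) (g2 : List Int × List Int) (n : Int) (m : Int) (out : List Int × List Int) : Decidable (Spec_group_multiply g1 g2 n m out) := by unfold Spec_group_multiply; infer_instance

-- ===== CLAIM (what is proved, stated in full; the proofs are below) =====
def Claim_equal_group_multiply : Prop := ∀ (g1 : List Int × List Int) (g2 : List Int × List Int) (n : Int) (m : Int), Dom_group_multiply g1 g2 n m → Pre_group_multiply g1 g2 n m → Spec_group_multiply g1 g2 n m (group_multiply g1 g2 n m)

-- ===== LEMMAS AND PROOFS =====

theorem pvSetItem_length {α : Type} (xs : List α) (i : Int) (v : α) :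
    (pvSetItem xs i v).length = xs.length := by
  unfold pvSetItem
  dsimp only
  split_ifs <;> first | exact List.length_set | rfl

theorem pvSetItem_getElem?_self {α : Type} (xs : List α) (i : Int) (v : α)
    (h0 : 0 ≤ i) (h1 : i < xs.length) :
    (pvSetItem xs i v)[i.toNat]? = some v := by
  unfold pvSetItem
  dsimp only
  rw [if_neg (not_lt.mpr h0), if_pos ⟨h0, h1⟩]
  exact List.getElem?_set_self (by omega)

theorem pvSetItem_getElem?_ne {α : Type} (xs : List α) (i : Int) (v : α) (k : Nat)
    (h0 : 0 ≤ i) (h : i ≠ (k : Int)) :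
    (pvSetItem xs i v)[k]? = xs[k]? := by
  unfold pvSetItem
  dsimp only
  rw [if_neg (not_lt.mpr h0)]
  split
  · exact List.getElem?_set_ne (by omega)
  · rfl

-- a scatter loop never touches an index no iteration writes
theorem scatter_getElem?_miss {α : Type} (l : List Int) (t : Int → Int) (v : Int → α)
    (init : List α) (k : Nat)
    (hb : ∀ i ∈ l, 0 ≤ t i) (hne : ∀ i ∈ l, t i ≠ (k : Int)) :
    (l.foldl (fun acc i => pvSetItem acc (t i) (v i)) init)[k]? = init[k]? := by
  induction l generalizing init with
  | nil => rfl
  | cons x l ih =>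
    rw [List.foldl_cons, ih _ (fun i hi => hb i (by simp [hi])) (fun i hi => hne i (by simp [hi])),
      pvSetItem_getElem?_ne _ _ _ _ (hb x (by simp)) (hne x (by simp))]

-- reading back A's scatter over pairwise-distinct in-range target indices: the value of the
-- (unique) writing iteration, or the initial entry if no iteration writes index k
theorem scatter_getElem? {α : Type} (l : List Int) (t : Int → Int) (v : Int → α)
    (init : List α) (k : Nat)
    (hb : ∀ i ∈ l, 0 ≤ t i ∧ t i < init.length)
    (hinj : (l.map t).Nodup) :
    (l.foldl (fun acc i => pvSetItem acc (t i) (v i)) init)[k]? =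
      match l.find? (fun i => t i == (k : Int)) with
      | some i => some (v i)
      | none => init[k]? := by
  induction l generalizing init with
  | nil => rfl
  | cons x l ih =>
    rw [List.foldl_cons]
    simp only [List.map_cons, List.nodup_cons, List.mem_map] at hinj
    by_cases hx : t x = (k : Int)
    · rw [List.find?_cons_of_pos (by simp [hx])]
      rw [scatter_getElem?_miss _ _ _ _ _ (fun i hi => (hb i (by simp [hi])).1)]
      · show (pvSetItem init (t x) (v x))[k]? = some (v x)
        rw [show k = (t x).toNat from by omega]
        exact pvSetItem_getElem?_self _ _ _ (hb x (by simp)).1 (by exact_mod_cast (hb x (by simp)).2)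
      · intro i hi hik
        exact hinj.1 ⟨i, hi, by omega⟩
    · rw [List.find?_cons_of_neg (by simp [hx])]
      rw [ih _ (fun i hi => by
            have := hb i (by simp [hi])
            simpa [pvSetItem_length] using this) hinj.2]
      have hinit : (pvSetItem init (t x) (v x))[k]? = init[k]? :=
        pvSetItem_getElem?_ne _ _ _ _ (hb x (by simp)).1 hx
      cases hf : l.find? (fun i => t i == (k : Int)) <;> simp [hinit]

-- pigeonhole: a Nodup list of N ints all in [0, N) contains every k in [0, N)
theorem perm_surjective (s : List Int) (N : Nat) (hlen : s.length = N)
    (hnd : s.Nodup) (hb : ∀ x ∈ s, 0 ≤ x ∧ x < (N : Int)) (k : Int)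
    (hk0 : 0 ≤ k) (hkN : k < (N : Int)) : k ∈ s := by
  classical
  have hsub : s.toFinset ⊆ (Finset.range N).image (fun j : Nat => (j : Int)) := by
    intro x hx
    have hx' := hb x (List.mem_toFinset.mp hx)
    exact Finset.mem_image.mpr ⟨x.toNat, Finset.mem_range.mpr (by omega), by omega⟩
  have hcard : ((Finset.range N).image (fun j : Nat => (j : Int))).card = N := by
    rw [Finset.card_image_of_injective _ (fun a b h => by exact_mod_cast h), Finset.card_range]
  have heq : s.toFinset = (Finset.range N).image (fun j : Nat => (j : Int)) := by
    apply Finset.eq_of_subset_of_card_le hsub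
    rw [hcard, List.toFinset_card_of_nodup hnd, hlen]
  have : k ∈ s.toFinset := by
    rw [heq]
    exact Finset.mem_image.mpr ⟨k.toNat, Finset.mem_range.mpr (by omega), by omega⟩
  exact List.mem_toFinset.mp this

theorem group_multiply_spec : Claim_equal_group_multiply := by
  intro g1 g2 n m _hdom hpre
  obtain ⟨sigma1, a⟩ := g1
  obtain ⟨sigma2, b⟩ := g2
  rcases hpre with hdeg | hmain
  · -- degenerate case: n ≤ 0 — the bottom loops never run, both sides return (sigma12, [])
    have hn0 : n ≤ 0 := hdeg.1
    unfold Spec_group_multiply group_multiply group_multiply_alt compose_permutations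
    simp [PySem.List.pyRange_one_eq_nil hn0]
  obtain ⟨hn, h1, h2, _h3, h4, hnd, hb1, _hb2, _hm⟩ := hmain
  dsimp only at h1 h2 h4 hnd hb1
  obtain ⟨N, rfl⟩ : ∃ N : Nat, n = (N : Int) := ⟨n.toNat, (Int.toNat_of_nonneg hn).symm⟩
  simp only [Int.toNat_natCast] at h1 h2 h4
  unfold Spec_group_multiply group_multiply group_multiply_alt
  dsimp only
  rw [Prod.mk.injEq]
  refine ⟨by unfold compose_permutations; rfl, ?_⟩
  -- the sorted pair list is the gather table: pairs = [(0, b[inv 0]), (1, b[inv 1]), …]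
  have hzlen : (List.zip sigma1 b).length = N := by
    rw [List.length_zip, h1]; omega
  have hfind : ∀ k : Int, 0 ≤ k → k < (N : Int) →
      ∃ p, (List.zip sigma1 b).find? (fun p => p.1 == k) = some p := by
    intro k hk0 hkN
    have hks : k ∈ sigma1 := perm_surjective sigma1 N h1 hnd (fun x hx => by
      have := hb1 x hx; exact ⟨this.1, this.2⟩) k hk0 hkN
    obtain ⟨j, hj, hjk⟩ := List.mem_iff_getElem.mp hks
    have hjz : j < (List.zip sigma1 b).length := by omega
    have : ((List.zip sigma1 b)[j].1 == k) = true := by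
      simp [List.getElem_zip, hjk]
    have hsm : ((List.zip sigma1 b).find? (fun p => p.1 == k)).isSome = true := by
      rw [List.find?_isSome]
      exact ⟨_, List.getElem_mem hjz, this⟩
    exact Option.isSome_iff_exists.mp hsm
  have hpairs : PySem.List.sorted (List.zip sigma1 b) (fun p => p.1) false =
      (PySem.List.pyRange 0 (N : Int)).map (fun k =>
        match (List.zip sigma1 b).find? (fun p => p.1 == k) with
        | some p => p
        | none => (k, 0)) := by
    apply PySem.List.sorted_eq_of_perm_of_pairwise_lt
    · -- the gather table is a permutation of the zip
      have hfst : ∀ k ∈ PySem.List.pyRange 0 (N : Int),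
          ((match (List.zip sigma1 b).find? (fun p => p.1 == k) with
            | some p => p
            | none => ((k : Int), (0 : Int))) : Int × Int).1 = k := by
        intro k hk
        rcases PySem.List.mem_pyRange_one.mp hk with ⟨hk0, hkN⟩
        obtain ⟨p, hp⟩ := hfind k hk0 hkN
        have := List.find?_some hp
        simp only [beq_iff_eq] at this
        simp [hp, this]
      have hndT : ((PySem.List.pyRange 0 (N : Int)).map (fun k =>
          match (List.zip sigma1 b).find? (fun p => p.1 == k) with
          | some p => p
          | none => ((k : Int), (0 : Int)))).Nodup := by
        apply List.Nodup.map_on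
        · intro x hx y hy hxy
          have := congrArg Prod.fst hxy
          rwa [hfst x hx, hfst y hy] at this
        · exact PySem.List.nodup_pyRange_one 0 (N : Int)
      have hsubset : ((PySem.List.pyRange 0 (N : Int)).map (fun k =>
          match (List.zip sigma1 b).find? (fun p => p.1 == k) with
          | some p => p
          | none => ((k : Int), (0 : Int)))) ⊆ List.zip sigma1 b := by
        intro p hp
        rcases List.mem_map.mp hp with ⟨k, hk, hpk⟩
        rcases PySem.List.mem_pyRange_one.mp hk with ⟨hk0, hkN⟩
        obtain ⟨q, hq⟩ := hfind k hk0 hkN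
        rw [hq] at hpk
        rw [← hpk]
        exact List.mem_of_find?_eq_some hq
      refine List.Subperm.perm_of_length_le (List.Nodup.subperm hndT hsubset) ?_
      simp [hzlen, PySem.List.length_pyRange_one]
    · -- strictly increasing first components
      apply List.pairwise_iff_getElem.mpr
      intro i j hi hj hij
      simp only [List.length_map, PySem.List.length_pyRange_one] at hi hj
      rw [List.getElem_map, List.getElem_map]
      have hfst : ∀ k ∈ PySem.List.pyRange 0 (N : Int),
          ((match (List.zip sigma1 b).find? (fun p => p.1 == k) with
            | some p => p
            | none => ((k : Int), (0 : Int))) : Int × Int).1 = k := by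
        intro k hk
        rcases PySem.List.mem_pyRange_one.mp hk with ⟨hk0, hkN⟩
        obtain ⟨p, hp⟩ := hfind k hk0 hkN
        have := List.find?_some hp
        simp only [beq_iff_eq] at this
        simp [hp, this]
      have hli : (PySem.List.pyRange 0 (N : Int)).length = (N : Int).toNat := PySem.List.length_pyRange_one 0 (N : Int)
      rw [hfst _ (List.getElem_mem (by omega)), hfst _ (List.getElem_mem (by omega))]
      rw [PySem.List.getElem_pyRange_one, PySem.List.getElem_pyRange_one]
      omega
  -- now compare the two bottom maps pointwise over range(n)
  apply List.map_congr_left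
  intro i hi
  rcases PySem.List.mem_pyRange_one.mp hi with ⟨hi0, hiN⟩
  -- A's table entry: inv_sigma1[i] = some j with sigma1[j] = i
  have hbt : ∀ x ∈ PySem.List.pyRange 0 ((sigma1.length : Int)),
      0 ≤ PySem.List.pyGetD sigma1 x 0 ∧
        PySem.List.pyGetD sigma1 x 0 < ((List.replicate sigma1.length (none : Option Int)).length : Int) := by
    intro x hx
    rcases PySem.List.mem_pyRange_one.mp hx with ⟨hx0, hxL⟩
    rw [PySem.List.pyGetD_eq_getElem sigma1 0 hx0 hxL]
    have hxlt : x.toNat < sigma1.length := by omega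
    have := hb1 sigma1[x.toNat] (List.getElem_mem hxlt)
    simp only [List.length_replicate]
    have h2' := this.2
    exact ⟨this.1, by omega⟩
  have hndm : ((PySem.List.pyRange 0 ((sigma1.length : Int))).map
      (fun x => PySem.List.pyGetD sigma1 x 0)).Nodup := by
    rw [PySem.List.map_pyGetD_pyRange_zero' sigma1 0]
    exact hnd
  have hinv : PySem.List.pyGetD (invert_permutation sigma1) i none =
      (match (PySem.List.pyRange 0 ((sigma1.length : Int))).find?
          (fun x => PySem.List.pyGetD sigma1 x 0 == i) with
       | some j => some j
       | none => none) := by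
    unfold invert_permutation
    rw [PySem.List.pyGetD_of_nonneg]
    · rw [List.getD_eq_getElem?_getD]
      have hS := scatter_getElem? (PySem.List.pyRange 0 ((sigma1.length : Int)))
        (fun x => PySem.List.pyGetD sigma1 x 0) (fun x => some x)
        (List.replicate sigma1.length (none : Option Int)) i.toNat hbt hndm
      beta_reduce at hS
      rw [show ((i.toNat : Nat) : Int) = i from by omega] at hS
      rw [hS]
      cases hf : (PySem.List.pyRange 0 ((sigma1.length : Int))).find?
          (fun x => PySem.List.pyGetD sigma1 x 0 == i) <;>
        simp [h1, show i.toNat < N from by omega]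
    · exact hi0
  rw [hpairs, hinv]
  -- B's table entry at i
  rw [PySem.List.pyGetD_map_pyRange_of_nonneg _ (N : Int) i _ hi0 hiN]
  obtain ⟨p, hp⟩ := hfind i hi0 hiN
  have hpfst : p.1 = i := by
    have := List.find?_some hp
    simpa using this
  -- the unique index j with sigma1[j] = i, from both sides
  cases hfA : (PySem.List.pyRange 0 ((sigma1.length : Int))).find?
      (fun x => PySem.List.pyGetD sigma1 x 0 == i) with
  | none =>
    exfalso
    have hmem : p ∈ List.zip sigma1 b := List.mem_of_find?_eq_some hp
    obtain ⟨j, hj, hjp⟩ := List.mem_iff_getElem.mp hmem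
    have hj1 : j < sigma1.length := by rw [hzlen] at hj; omega
    have hjm : ((j : Int)) ∈ PySem.List.pyRange 0 ((sigma1.length : Int)) :=
      PySem.List.mem_pyRange_one.mpr ⟨by omega, by exact_mod_cast hj1⟩
    have hs1 : sigma1[j] = i := by
      calc sigma1[j] = ((sigma1.zip b)[j]'hj).1 := by rw [List.getElem_zip]
        _ = p.1 := by rw [hjp]
        _ = i := hpfst
    exact absurd (List.find?_eq_none.mp hfA _ hjm)
      (by simp [List.getElem?_eq_getElem hj1, hs1])
  | some j =>
    -- sigma1[j] = i; pair p = (i, b at the same index); values agree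
    have hjmem := List.mem_of_find?_eq_some hfA
    rcases PySem.List.mem_pyRange_one.mp hjmem with ⟨hj0, hjL⟩
    have hjval : PySem.List.pyGetD sigma1 j 0 = i := by
      have := List.find?_some hfA
      simpa using this
    rw [PySem.List.pyGetD_eq_getElem sigma1 0 hj0 hjL] at hjval
    have hmem : p ∈ List.zip sigma1 b := List.mem_of_find?_eq_some hp
    obtain ⟨j', hj', hjp⟩ := List.mem_iff_getElem.mp hmem
    have hj'1 : j' < sigma1.length := by rw [hzlen] at hj'; omega
    have hj'b : j' < b.length := by rw [List.length_zip] at hj'; omega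
    have hj'val : sigma1[j'] = i := by
      calc sigma1[j'] = ((sigma1.zip b)[j']'hj').1 := by rw [List.getElem_zip]
        _ = p.1 := by rw [hjp]
        _ = i := hpfst
    have hpsnd : p.2 = b[j']'hj'b := by
      calc p.2 = ((sigma1.zip b)[j']'hj').2 := by rw [hjp]
        _ = b[j']'hj'b := by rw [List.getElem_zip]
    -- Nodup: the two indices coincide
    have hjj : j.toNat = j' := by
      have := List.Nodup.getElem_inj_iff hnd (i := j.toNat)
        (hi := by omega) (j := j') (hj := hj'1)
      exact this.mp (by rw [hjval, hj'val])
    subst hjj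
    have hval : PySem.List.pyGetD b j 0 = p.2 := by
      rw [PySem.List.pyGetD_eq_getElem b 0 hj0 (by omega), hpsnd]
    rw [hp]
    dsimp only
    rw [hval]
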